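-- pv_equiv track=rewrite | github.com/RIPON-SINGHA/coding-practices-python-and-JavaScript- | PYTHON/reverse_half_number.py | revHalfInt
-- ===== SOURCE A (Python) =====
-- def revHalfInt(n):
--     if n == 0:
--         return 0
--
--     n = abs(n)
--     num = n
--     Totalcount = 0
--
--     while n > 0:
--         Totalcount += 1
--         n = n // 10
--
--     count = Totalcount // 2
--     rev = 0
--
--     while count > 0:
--         digit = num % 10
--         rev = rev * 10
--         rev = rev + digit
--         num = num // 10
--         count -= 1
--
--     return rev
-- ===== SOURCE B (Python) =====
-- def revHalfInt(n):
--     s = str(abs(n))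
--     half = len(s) // 2
--     rev = 0
--     for c in reversed(s[len(s) - half:]):
--         rev = 10 * rev + ord(c) - 48
--     return rev
-- ===== Notes on version B (the rewrite author's own statement) =====
-- stated objective: simpler
-- what changed: Replaces A's two arithmetic while-loops (one to count digits by repeated //10, one to peel and reassemble digits) with a branch-free string version: take the low half of str(abs(n)) by slicing and parse it reversed in a single fold; the digit-count loop and the zero special case disappear.
import Mathlib
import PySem

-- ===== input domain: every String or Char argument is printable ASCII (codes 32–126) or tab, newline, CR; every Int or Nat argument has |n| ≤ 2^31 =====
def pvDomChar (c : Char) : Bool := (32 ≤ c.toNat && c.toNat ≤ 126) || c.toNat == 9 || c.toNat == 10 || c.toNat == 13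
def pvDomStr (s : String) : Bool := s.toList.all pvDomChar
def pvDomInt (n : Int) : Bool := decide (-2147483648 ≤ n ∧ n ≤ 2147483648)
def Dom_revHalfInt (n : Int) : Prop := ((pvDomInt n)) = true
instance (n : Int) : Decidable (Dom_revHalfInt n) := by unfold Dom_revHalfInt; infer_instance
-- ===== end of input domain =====

-- B replaces A's two arithmetic while-loops (digit count, then digit peel-off) by a
-- branch-free string version: slice the low half of str(abs(n)) and parse it reversed
-- in one fold (objective: simpler).

-- ===== PORT A =====
-- first while loop: while n > 0: Totalcount += 1; n = n // 10
def pvCountLoop (n : Int) (tc : Int) : Int :=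
  if h : 0 < n then pvCountLoop (PySem.Int.floordiv n 10) (tc + 1) else tc
termination_by n.toNat
decreasing_by
  have h10 : PySem.Int.floordiv n 10 = n / 10 := PySem.Int.floordiv_eq_ediv_of_pos (by omega)
  rw [h10]; omega

-- second while loop: while count > 0: digit = num % 10; rev = rev*10 + digit; num //= 10; count -= 1
def pvRevLoop (count num rev : Int) : Int :=
  if h : 0 < count then
    pvRevLoop (count - 1) (PySem.Int.floordiv num 10) (rev * 10 + PySem.Int.mod num 10)
  else rev
termination_by count.toNat
decreasing_by omega

def revHalfInt (n : Int) : Int :=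
  if n = 0 then 0
  else
    let n1 := |n|          -- n = abs(n)
    let num := n1
    let totalcount := pvCountLoop n1 0
    let count := PySem.Int.floordiv totalcount 2
    pvRevLoop count num 0

-- ===== PORT B =====
def revHalfInt_alt (n : Int) : Int :=
  let s : List Char := PySem.Int.toChars |n|                 -- s = str(abs(n))
  let half : Int := PySem.Int.floordiv (s.length : Int) 2    -- half = len(s) // 2
  let low : List Char := PySem.List.slice s (some ((s.length : Int) - half)) none  -- s[len(s)-half:]
  low.reverse.foldl (fun rev c => 10 * rev + (c.toNat : Int) - 48) 0
         -- for c in reversed(...): rev = 10*rev + ord(c) - 48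

-- ===== PRECONDITION & SPEC =====
def Spec_revHalfInt (n : Int) (out : Int) : Prop := out = revHalfInt_alt n
instance (n : Int) (out : Int) : Decidable (Spec_revHalfInt n out) := by unfold Spec_revHalfInt; infer_instance

-- ===== CLAIM (what is proved, stated in full; the proofs are below) =====
def Claim_equal_revHalfInt : Prop := ∀ (n : Int), Dom_revHalfInt n → Spec_revHalfInt n (revHalfInt n)

-- ===== LEMMAS AND PROOFS =====

-- A's first loop counts the decimal digits of m.
lemma pvCountLoop_eq (m : Nat) (tc : Int) :
    pvCountLoop (m : Int) tc = tc + (Nat.digits 10 m).length := by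
  induction m using Nat.strong_induction_on generalizing tc with
  | _ m ih =>
    rw [pvCountLoop]
    by_cases hm : 0 < m
    · rw [dif_pos (by exact_mod_cast hm)]
      rw [show PySem.Int.floordiv (m : Int) 10 = ((m / 10 : Nat) : Int) from
            PySem.Int.floordiv_natCast m 10]
      rw [ih (m / 10) (Nat.div_lt_self hm (by norm_num)) (tc + 1)]
      rw [Nat.digits_def' (by norm_num : 1 < 10) hm]
      simp; omega
    · have : m = 0 := by omega
      subst this
      rw [dif_neg (by simp)]
      simp

-- A's second loop folds the k low little-endian digits into rev (k ≤ number of digits).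
lemma pvRevLoop_eq (k : Nat) (m : Nat) (rev : Int) (hk : k ≤ (Nat.digits 10 m).length) :
    pvRevLoop (k : Int) (m : Int) rev =
      ((Nat.digits 10 m).take k).foldl (fun (r : Int) (d : Nat) => r * 10 + (d : Int)) rev := by
  induction k generalizing m rev with
  | zero => rw [pvRevLoop]; simp
  | succ k ih =>
    have hm : 0 < m := by
      by_contra h
      have : m = 0 := by omega
      subst this; simp at hk
    rw [pvRevLoop, dif_pos (by exact_mod_cast Nat.succ_pos k)]
    rw [show ((k + 1 : Nat) : Int) - 1 = (k : Int) by push_cast; ring]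
    rw [show PySem.Int.floordiv (m : Int) 10 = ((m / 10 : Nat) : Int) from
          PySem.Int.floordiv_natCast m 10,
        show PySem.Int.mod (m : Int) 10 = ((m % 10 : Nat) : Int) from
          PySem.Int.mod_natCast m 10]
    have hk' : k ≤ (Nat.digits 10 (m / 10)).length := by
      rw [Nat.digits_def' (by norm_num : 1 < 10) hm] at hk
      simpa using Nat.lt_succ_iff.mp (Nat.lt_of_lt_of_le (Nat.lt_succ_self k) hk)
    rw [ih (m / 10) (rev * 10 + ((m % 10 : Nat) : Int)) hk']
    rw [Nat.digits_def' (by norm_num : 1 < 10) hm]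
    simp [List.foldl_cons]

-- str(m) is the big-endian digit characters (m > 0).
lemma toDigits_eq (m : Nat) (hm : 0 < m) :
    Nat.toDigits 10 m = ((Nat.digits 10 m).map Nat.digitChar).reverse := by
  induction m using Nat.strong_induction_on with
  | _ m ih =>
    rw [Nat.toDigits_eq_if (by norm_num)]
    by_cases h : m < 10
    · rw [if_pos h, Nat.digits_def' (by norm_num : 1 < 10) hm,
          Nat.mod_eq_of_lt h, Nat.div_eq_of_lt h, Nat.digits_zero]
      simp
    · rw [if_neg h, ih (m / 10) (Nat.div_lt_self hm (by norm_num))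
            (Nat.div_pos (by omega) (by norm_num)),
          Nat.digits_def' (by norm_num : 1 < 10) hm]
      simp

-- the main bridge for n ≠ 0, stated over m = n.natAbs
lemma main_eq (m : Nat) (hm : 0 < m) :
    pvRevLoop (PySem.Int.floordiv (pvCountLoop (m : Int) 0) 2) (m : Int) 0 =
      revHalfInt_alt (m : Int) := by
  have hcount : pvCountLoop (m : Int) 0 = ((Nat.digits 10 m).length : Int) := by
    rw [pvCountLoop_eq m 0]; simp
  have hhalf : PySem.Int.floordiv ((Nat.digits 10 m).length : Int) 2
      = (((Nat.digits 10 m).length / 2 : Nat) : Int) :=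
    PySem.Int.floordiv_natCast _ 2
  -- A side
  rw [hcount, hhalf, pvRevLoop_eq _ m 0 (Nat.div_le_self _ 2)]
  -- B side
  simp only [revHalfInt_alt]
  have habs : |(m : Int)| = (m : Int) := abs_of_nonneg (Int.natCast_nonneg m)
  have htc : PySem.Int.toChars (m : Int) = ((Nat.digits 10 m).map Nat.digitChar).reverse := by
    unfold PySem.Int.toChars
    rw [if_neg (by simp), Int.toNat_natCast]
    exact toDigits_eq m hm
  rw [habs, htc]
  have hlen : (((Nat.digits 10 m).map Nat.digitChar).reverse).length
      = (Nat.digits 10 m).length := by simp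
  rw [hlen, hhalf]
  have hsub : (((Nat.digits 10 m).length : Nat) : Int)
        - (((Nat.digits 10 m).length / 2 : Nat) : Int)
      = (((Nat.digits 10 m).length - (Nat.digits 10 m).length / 2 : Nat) : Int) := by
    have := Nat.div_le_self (Nat.digits 10 m).length 2
    push_cast [Nat.cast_sub this]; ring
  rw [hsub, PySem.List.slice_from_natCast, List.drop_reverse]
  have htake : ((Nat.digits 10 m).map Nat.digitChar).length
        - ((Nat.digits 10 m).length - (Nat.digits 10 m).length / 2)
      = (Nat.digits 10 m).length / 2 := by
    simp only [List.length_map]; omega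
  rw [htake, List.reverse_reverse, ← List.map_take, List.foldl_map]
  apply PySem.List.foldl_congr_mem
  intro acc d hd
  have hd10 : d < 10 := Nat.digits_lt_base' (List.mem_of_mem_take hd)
  have hch : (Nat.digitChar d).toNat = d + 48 := by interval_cases d <;> rfl
  rw [hch]; push_cast; ring

-- ===== VERDICT (by name: the statement is the Claim_ definition above) =====
theorem revHalfInt_spec : Claim_equal_revHalfInt := by
  intro n _
  unfold Spec_revHalfInt revHalfInt
  by_cases h0 : n = 0
  · subst h0; simp; decide
  · rw [if_neg h0]
    have hm : 0 < n.natAbs := Int.natAbs_pos.mpr h0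
    have hBabs : revHalfInt_alt ((n.natAbs : Nat) : Int) = revHalfInt_alt n := by
      simp only [revHalfInt_alt]
      rw [abs_of_nonneg (Int.natCast_nonneg _), ← Int.abs_eq_natAbs]
    rw [Int.abs_eq_natAbs, main_eq n.natAbs hm, hBabs]
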